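-- pv_equiv track=rewrite | github.com/ARCAlhau80/LotoScope | teste_ordenacoes_quadrantes.py | criar_quadrantes_zigzag
-- ===== SOURCE A (Python) =====
-- def criar_quadrantes_zigzag(freq_dict):
--     """Intercala números de alta e baixa frequência em cada quadrante"""
--     ordenado = sorted(range(1, 26), key=lambda x: freq_dict.get(x, 0), reverse=True)
--
--     # Intercala: 1º, último, 2º, penúltimo...
--     zigzag = []
--     left, right = 0, 24
--     while left <= right:
--         if left == right:
--             zigzag.append(ordenado[left])
--         else:
--             zigzag.append(ordenado[left])
--             zigzag.append(ordenado[right])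
--         left += 1
--         right -= 1
--
--     return {
--         'Q1_ZIG': zigzag[0:5],
--         'Q2_ZIG': zigzag[5:10],
--         'Q3_ZIG': zigzag[10:15],
--         'Q4_ZIG': zigzag[15:20],
--         'Q5_ZIG': zigzag[20:25]
--     }
-- ===== SOURCE B (Python) =====
-- def criar_quadrantes_zigzag(freq_dict):
--     """Intercala números de alta e baixa frequência em cada quadrante"""
--     ordenado = sorted(range(1, 26), key=lambda x: freq_dict.get(x, 0), reverse=True)
--     # split into the first 13 and the reversed last 12, interleave, middle element last
--     front = ordenado[:13]
--     back = list(reversed(ordenado[13:]))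
--     zigzag = [x for pair in zip(front, back) for x in pair]
--     zigzag.append(front[12])
--     return {
--         'Q1_ZIG': zigzag[0:5],
--         'Q2_ZIG': zigzag[5:10],
--         'Q3_ZIG': zigzag[10:15],
--         'Q4_ZIG': zigzag[15:20],
--         'Q5_ZIG': zigzag[20:25]
--     }
-- ===== Notes on version B (the rewrite author's own statement) =====
-- stated objective: alternative
-- what changed: Replaces A's inward two-pointer while-loop with a split of the sorted list into a front half and a reversed back half, interleaved via zip and flattened, with the single middle element appended once.
import Mathlib
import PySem

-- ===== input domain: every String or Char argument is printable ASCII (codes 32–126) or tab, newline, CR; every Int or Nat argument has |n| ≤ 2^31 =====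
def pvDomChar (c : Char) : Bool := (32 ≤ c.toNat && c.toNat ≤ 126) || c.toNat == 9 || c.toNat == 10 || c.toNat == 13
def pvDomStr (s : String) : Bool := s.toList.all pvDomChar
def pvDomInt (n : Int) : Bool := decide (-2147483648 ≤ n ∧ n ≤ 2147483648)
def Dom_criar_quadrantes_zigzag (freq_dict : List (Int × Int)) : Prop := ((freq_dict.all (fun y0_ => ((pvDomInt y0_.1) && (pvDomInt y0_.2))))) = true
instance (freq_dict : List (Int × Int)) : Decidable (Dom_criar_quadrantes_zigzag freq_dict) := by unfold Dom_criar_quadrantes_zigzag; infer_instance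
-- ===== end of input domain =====

-- B replaces A's inward two-pointer interleaving loop with a zip of the front half against the reversed back half plus the single middle element; same cost, different decomposition.


-- ===== PORT A =====
-- the while-loop `while left <= right: …` of A, with a fuel bound (the loop runs at most 13 times)
def pvZigLoop (ordenado : List Int) : Nat → Int → Int → List Int → List Int
  | 0, _, _, acc => acc
  | fuel + 1, left, right, acc =>
    if left ≤ right then
      let acc :=
        if left = right then acc ++ [PySem.List.pyGetD ordenado left 0]
        else acc ++ [PySem.List.pyGetD ordenado left 0, PySem.List.pyGetD ordenado right 0]
      pvZigLoop ordenado fuel (left + 1) (right - 1) acc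
    else acc

def criar_quadrantes_zigzag (freq_dict : List (Int × Int)) : List (String × List Int) :=
  let ordenado := PySem.List.sorted (PySem.List.pyRange 1 26 1) (fun x => PySem.Dict.getD (PySem.Dict.mk freq_dict) x (0 : Int)) true
  let zigzag := pvZigLoop ordenado 25 0 24 []
  [("Q1_ZIG", PySem.List.slice zigzag (some 0) (some 5)),
   ("Q2_ZIG", PySem.List.slice zigzag (some 5) (some 10)),
   ("Q3_ZIG", PySem.List.slice zigzag (some 10) (some 15)),
   ("Q4_ZIG", PySem.List.slice zigzag (some 15) (some 20)),
   ("Q5_ZIG", PySem.List.slice zigzag (some 20) (some 25))]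

-- ===== PORT B =====
def criar_quadrantes_zigzag_alt (freq_dict : List (Int × Int)) : List (String × List Int) :=
  let ordenado := PySem.List.sorted (PySem.List.pyRange 1 26 1) (fun x => PySem.Dict.getD (PySem.Dict.mk freq_dict) x (0 : Int)) true
  let front := PySem.List.slice ordenado none (some 13)
  let back := (PySem.List.slice ordenado (some 13) none).reverse
  let zigzag := (front.zip back).flatMap (fun p => [p.1, p.2]) ++ [PySem.List.pyGetD front 12 0]
  [("Q1_ZIG", PySem.List.slice zigzag (some 0) (some 5)),
   ("Q2_ZIG", PySem.List.slice zigzag (some 5) (some 10)),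
   ("Q3_ZIG", PySem.List.slice zigzag (some 10) (some 15)),
   ("Q4_ZIG", PySem.List.slice zigzag (some 15) (some 20)),
   ("Q5_ZIG", PySem.List.slice zigzag (some 20) (some 25))]

-- ===== PRECONDITION & SPEC =====
def Spec_criar_quadrantes_zigzag (freq_dict : List (Int × Int)) (out : List (String × List Int)) : Prop := out = criar_quadrantes_zigzag_alt freq_dict
instance (freq_dict : List (Int × Int)) (out : List (String × List Int)) : Decidable (Spec_criar_quadrantes_zigzag freq_dict out) := by unfold Spec_criar_quadrantes_zigzag; infer_instance

-- ===== CLAIM (what is proved, stated in full; the proofs are below) =====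
def Claim_equal_criar_quadrantes_zigzag : Prop := ∀ (freq_dict : List (Int × Int)), Dom_criar_quadrantes_zigzag freq_dict → Spec_criar_quadrantes_zigzag freq_dict (criar_quadrantes_zigzag freq_dict)

-- ===== LEMMAS AND PROOFS =====
lemma pvCons {α : Type} {l : List α} {n : Nat} (h : l.length = n + 1) :
    ∃ a t, l = a :: t ∧ t.length = n := by
  cases l with
  | nil => simp at h
  | cons a t => exact ⟨a, t, rfl, by simpa using h⟩

lemma pvZig_eq (l : List Int) (h : l.length = 25) :
    pvZigLoop l 25 0 24 [] =
      ((PySem.List.slice l none (some 13)).zip ((PySem.List.slice l (some 13) none).reverse)).flatMap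
        (fun p => [p.1, p.2]) ++ [PySem.List.pyGetD (PySem.List.slice l none (some 13)) 12 0] := by
  obtain ⟨a0, l, rfl, h0⟩ := pvCons (n := 24) h
  obtain ⟨a1, l, rfl, h1⟩ := pvCons (n := 23) h0
  obtain ⟨a2, l, rfl, h2⟩ := pvCons (n := 22) h1
  obtain ⟨a3, l, rfl, h3⟩ := pvCons (n := 21) h2
  obtain ⟨a4, l, rfl, h4⟩ := pvCons (n := 20) h3
  obtain ⟨a5, l, rfl, h5⟩ := pvCons (n := 19) h4
  obtain ⟨a6, l, rfl, h6⟩ := pvCons (n := 18) h5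
  obtain ⟨a7, l, rfl, h7⟩ := pvCons (n := 17) h6
  obtain ⟨a8, l, rfl, h8⟩ := pvCons (n := 16) h7
  obtain ⟨a9, l, rfl, h9⟩ := pvCons (n := 15) h8
  obtain ⟨a10, l, rfl, h10⟩ := pvCons (n := 14) h9
  obtain ⟨a11, l, rfl, h11⟩ := pvCons (n := 13) h10
  obtain ⟨a12, l, rfl, h12⟩ := pvCons (n := 12) h11
  obtain ⟨a13, l, rfl, h13⟩ := pvCons (n := 11) h12
  obtain ⟨a14, l, rfl, h14⟩ := pvCons (n := 10) h13
  obtain ⟨a15, l, rfl, h15⟩ := pvCons (n := 9) h14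
  obtain ⟨a16, l, rfl, h16⟩ := pvCons (n := 8) h15
  obtain ⟨a17, l, rfl, h17⟩ := pvCons (n := 7) h16
  obtain ⟨a18, l, rfl, h18⟩ := pvCons (n := 6) h17
  obtain ⟨a19, l, rfl, h19⟩ := pvCons (n := 5) h18
  obtain ⟨a20, l, rfl, h20⟩ := pvCons (n := 4) h19
  obtain ⟨a21, l, rfl, h21⟩ := pvCons (n := 3) h20
  obtain ⟨a22, l, rfl, h22⟩ := pvCons (n := 2) h21
  obtain ⟨a23, l, rfl, h23⟩ := pvCons (n := 1) h22
  obtain ⟨a24, l, rfl, h24⟩ := pvCons (n := 0) h23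
  obtain rfl : l = [] := List.eq_nil_of_length_eq_zero h24
  rfl

lemma pvSorted_len (freq_dict : List (Int × Int)) :
    (PySem.List.sorted (PySem.List.pyRange 1 26 1) (fun x => PySem.Dict.getD (PySem.Dict.mk freq_dict) x (0 : Int)) true).length = 25 := by
  rw [PySem.List.length_sorted, PySem.List.length_pyRange_one]
  decide

-- ===== VERDICT (by name: the statement is the Claim_ definition above) =====
theorem criar_quadrantes_zigzag_spec : Claim_equal_criar_quadrantes_zigzag := by
  intro fd _
  show criar_quadrantes_zigzag fd = criar_quadrantes_zigzag_alt fd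
  simp only [criar_quadrantes_zigzag, criar_quadrantes_zigzag_alt]
  rw [pvZig_eq _ (pvSorted_len fd)]
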